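-- pv_equiv track=rewrite | github.com/Ntsekees/word-order-illustrator-tools | text_from_woi_json.py | integer_positional_notation
-- ===== SOURCE A (Python) =====
-- def integer_positional_notation(number, digits):
--     # ⟦digits⟧ is a string or a sequence of all the digits used for encoding the number in positional notation; the number of digits is the target radix in which the number is to be encoded.
--     radix = int(len(digits))
--     n = int(number)
--     if n == 0:
--         return digits[0]
--     s = ""
--     while (n > 0):
--         s = digits[n % radix] + s
--         n //= radix
--     return s
-- ===== SOURCE B (Python) =====
-- def integer_positional_notation(number, digits):
--     # Precompute the ascending powers of the radix up to n, then extract digits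
--     # most-significant-first by Euclidean division against each power in
--     # descending order, collecting into a list joined at the end.
--     radix = int(len(digits))
--     n = int(number)
--     if n == 0:
--         return digits[0]
--     powers = []
--     p = 1
--     while p <= n:
--         powers.append(p)
--         p *= radix
--     out = []
--     for q in reversed(powers):
--         out.append(digits[n // q])
--         n %= q
--     return "".join(out)
-- ===== Notes on version B (the rewrite author's own statement) =====
-- stated objective: alternative
-- what changed: Replaces A's least-significant-first while loop that prepends digits while repeatedly dividing n with a two-phase algorithm: first build the ascending list of radix powers not exceeding n, then fold over them in descending order extracting each digit by division against the power and reducing n by modulo, appending most-significant-first.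
import Mathlib
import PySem

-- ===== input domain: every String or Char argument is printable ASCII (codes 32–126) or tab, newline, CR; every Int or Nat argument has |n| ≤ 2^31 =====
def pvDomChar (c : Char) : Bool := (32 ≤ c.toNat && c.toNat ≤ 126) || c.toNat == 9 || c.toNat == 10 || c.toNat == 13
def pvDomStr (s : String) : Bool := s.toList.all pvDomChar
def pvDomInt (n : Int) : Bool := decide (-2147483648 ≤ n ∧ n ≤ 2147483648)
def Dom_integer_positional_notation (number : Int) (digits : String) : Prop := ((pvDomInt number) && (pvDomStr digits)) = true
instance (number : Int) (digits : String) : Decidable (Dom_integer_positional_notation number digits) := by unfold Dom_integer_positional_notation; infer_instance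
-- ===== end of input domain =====

-- B replaces A's least-significant-first digit-prepending while loop with a two-phase
-- algorithm: precompute the ascending radix powers ≤ n, then extract digits
-- most-significant-first by division against each power; alternative, not faster.

-- ===== PORT A =====
-- `digits[i]` is total here via getD; Pre_ guarantees the index is in range wherever it is read.
def pvDigitAt (ds : List Char) (i : Int) : Char := (PySem.List.pyGet? ds i).getD ' '

-- the while loop of A; fuel only makes it total (Python's loop terminates iff radix ≥ 2 on n > 0)
def pvLoopA (fuel : Nat) (radix : Int) (ds : List Char) (n : Int) (s : List Char) : List Char :=
  match fuel with
  | 0 => s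
  | f + 1 =>
    if 0 < n then
      pvLoopA f radix ds (PySem.Int.floordiv n radix)
        (pvDigitAt ds (PySem.Int.mod n radix) :: s)
    else s

def integer_positional_notation (number : Int) (digits : String) : String :=
  let radix : Int := PySem.Str.len digits
  let n : Int := number
  if n = 0 then String.ofList [pvDigitAt digits.toList 0]
  else String.ofList (pvLoopA (n.toNat + 1) radix digits.toList n [])

-- ===== PORT B =====
-- Source B's `powers` while loop; fuel only makes it total (the loop terminates iff radix ≥ 2 on n > 0)
def pvPowsB (fuel : Nat) (radix : Int) (n : Int) (p : Int) : List Int :=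
  match fuel with
  | 0 => []
  | f + 1 => if p ≤ n then p :: pvPowsB f radix n (p * radix) else []

-- one iteration of Source B's for loop over reversed(powers): emit digits[n // q], then n %= q
def pvStepB (ds : List Char) (st : Int × List Char) (q : Int) : Int × List Char :=
  (PySem.Int.mod st.1 q, st.2 ++ [pvDigitAt ds (PySem.Int.floordiv st.1 q)])

def integer_positional_notation_alt (number : Int) (digits : String) : String :=
  let radix : Int := PySem.Str.len digits
  let n : Int := number
  if n = 0 then String.ofList [pvDigitAt digits.toList 0]
  else
    String.ofList (((pvPowsB (n.toNat + 1) radix n 1).reverse.foldl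
      (pvStepB digits.toList) (n, [])).2)

-- ===== PRECONDITION & SPEC =====
-- Pre_ excludes exactly the inputs where the Python A does not return: n = 0 with empty
-- digits (IndexError), n > 0 with empty digits (ZeroDivisionError) and n > 0 with a
-- single digit (the while loop never terminates). A returns on everything admitted.
def Pre_integer_positional_notation (number : Int) (digits : String) : Prop :=
  number < 0 ∨ (number = 0 ∧ digits.toList ≠ []) ∨ (0 < number ∧ 2 ≤ digits.toList.length)
instance (number : Int) (digits : String) : Decidable (Pre_integer_positional_notation number digits) := by
  unfold Pre_integer_positional_notation; infer_instance

def pvWitness_integer_positional_notation : Int × String := (10, "01")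

def Spec_integer_positional_notation (number : Int) (digits : String) (out : String) : Prop := out = integer_positional_notation_alt number digits
instance (number : Int) (digits : String) (out : String) : Decidable (Spec_integer_positional_notation number digits out) := by unfold Spec_integer_positional_notation; infer_instance

-- ===== CLAIM =====
def Claim_equal_integer_positional_notation : Prop := ∀ (number : Int) (digits : String), Dom_integer_positional_notation number digits → Pre_integer_positional_notation number digits → Spec_integer_positional_notation number digits (integer_positional_notation number digits)

-- ===== LEMMAS AND PROOFS =====

-- the common most-significant-first digit string both programs compute (proof-only helper)
def pvSpecDigits (r : Nat) (ds : List Char) (m : Nat) : List Char :=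
  if _h : m = 0 ∨ r ≤ 1 then [] else
    pvSpecDigits r ds (m / r) ++ [pvDigitAt ds ((m % r : Nat) : Int)]
termination_by m
decreasing_by exact Nat.div_lt_self (Nat.pos_of_ne_zero (by tauto)) (by omega)

theorem pvLoopA_nonpos (fuel : Nat) (radix : Int) (ds : List Char) (n : Int) (s : List Char)
    (h : ¬ 0 < n) : pvLoopA fuel radix ds n s = s := by
  cases fuel with
  | zero => rfl
  | succ f => simp [pvLoopA, h]

theorem pvPowsB_gt (fuel : Nat) (radix : Int) (n : Int) (p : Int)
    (h : ¬ p ≤ n) : pvPowsB fuel radix n p = [] := by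
  cases fuel with
  | zero => rfl
  | succ f => simp [pvPowsB, h]

theorem pvLoopA_spec (r : Nat) (ds : List Char) (hr : 2 ≤ r) :
    ∀ (fuel m : Nat) (s : List Char), 0 < m → m < fuel →
      pvLoopA fuel (r : Int) ds (m : Int) s = pvSpecDigits r ds m ++ s := by
  intro fuel
  induction fuel with
  | zero => intro m s hm hlt; omega
  | succ f ih =>
    intro m s hm hlt
    have hpos : (0 : Int) < (m : Int) := by exact_mod_cast hm
    have hdl : m / r < m := Nat.div_lt_self hm (by omega)
    rw [pvSpecDigits]
    rw [dif_neg (by omega : ¬ (m = 0 ∨ r ≤ 1))]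
    simp only [pvLoopA, if_pos hpos, PySem.Int.floordiv_natCast, PySem.Int.mod_natCast]
    by_cases hq : 0 < m / r
    · rw [ih (m / r) _ hq (Nat.lt_of_lt_of_le hdl (Nat.lt_succ_iff.mp hlt))]
      simp
    · rw [pvLoopA_nonpos _ _ _ _ _ (by exact_mod_cast hq)]
      rw [pvSpecDigits, dif_pos (Or.inl (Nat.le_zero.mp (Nat.not_lt.mp hq)))]
      simp

-- toNat/cast bridges for ediv and emod on nonnegative integers
theorem pv_toNat_ediv (a b : ℤ) (ha : 0 ≤ a) (hb : 0 ≤ b) : (a / b).toNat = a.toNat / b.toNat := by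
  rcases Int.eq_ofNat_of_zero_le ha with ⟨m, rfl⟩
  rcases Int.eq_ofNat_of_zero_le hb with ⟨k, rfl⟩
  rfl

-- the mid-digit identity: (n % (p*r)) / p = (n / p) % r  for 0 < p
theorem pv_mid_digit (n p r : ℤ) (hp : 0 < p) : (n % (p * r)) / p = (n / p) % r := by
  have h1 : n % (p * r) = n + (-(r * (n / (p * r)))) * p := by
    rw [Int.emod_def]; ring
  rw [h1, Int.add_mul_ediv_right _ _ (ne_of_gt hp), Int.emod_def,
    Int.ediv_ediv_of_nonneg (le_of_lt hp)]
  ring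

theorem foldPows (r : Int) (ds : List Char) (hr : 2 ≤ r) (n : Int) (hn : 0 < n) :
    ∀ (fuel : Nat) (p : Int) (acc : List Char), 1 ≤ p → p ≤ n → n < p * 2 ^ fuel →
      (pvPowsB fuel r n p).reverse.foldl (pvStepB ds) (n, acc)
        = (n % p, acc ++ pvSpecDigits r.toNat ds ((n / p).toNat)) := by
  intro fuel
  induction fuel with
  | zero => intro p acc hp hpn hbound; simp at hbound; omega
  | succ f ih =>
    intro p acc hp hpn hbound
    have hrpos : (0 : ℤ) < r := by omega
    have hppos : (0 : ℤ) < p := by omega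
    simp only [pvPowsB, if_pos hpn, List.reverse_cons, List.foldl_append, List.foldl_cons,
      List.foldl_nil]
    by_cases hnext : p * r ≤ n
    · have hb' : n < p * r * 2 ^ f := by
        have h2f : (1 : ℤ) ≤ 2 ^ f := one_le_pow₀ (by omega)
        have he : p * 2 ^ (f + 1) = p * 2 ^ f * 2 := by ring
        nlinarith
      rw [ih (p * r) acc (by nlinarith) hnext hb']
      have hq2 : r ≤ n / p := (Int.le_ediv_iff_mul_le hppos).mpr (by linarith)
      have hq0 : (0 : ℤ) ≤ n / p := by omega
      have hqtop : 0 < (n / p).toNat := by omega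
      have key : pvSpecDigits r.toNat ds ((n / p).toNat)
          = pvSpecDigits r.toNat ds ((n / (p * r)).toNat) ++ [pvDigitAt ds ((n / p) % r)] := by
        conv_lhs => rw [pvSpecDigits]
        rw [dif_neg (by omega : ¬ ((n / p).toNat = 0 ∨ r.toNat ≤ 1))]
        rw [show (n / p).toNat / r.toNat = (n / (p * r)).toNat by
          rw [← pv_toNat_ediv _ _ hq0 (by omega), Int.ediv_ediv_of_nonneg (le_of_lt hppos)]]
        rw [show ((((n / p).toNat % r.toNat : ℕ)) : ℤ) = (n / p) % r by
          rw [← Int.toNat_emod hq0 (by omega : (0:ℤ) ≤ r),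
            Int.toNat_of_nonneg (Int.emod_nonneg _ (ne_of_gt hrpos))]]
      unfold pvStepB
      simp only
      rw [PySem.Int.mod_eq_emod_of_pos hppos, Int.emod_emod_of_dvd _ ⟨r, rfl⟩,
        PySem.Int.floordiv_eq_ediv_of_pos hppos, pv_mid_digit n p r hppos, key]
      simp [List.append_assoc]
    · rw [pvPowsB_gt _ _ _ _ hnext]
      simp only [List.reverse_nil, List.foldl_nil]
      unfold pvStepB
      simp only
      rw [PySem.Int.mod_eq_emod_of_pos hppos, PySem.Int.floordiv_eq_ediv_of_pos hppos]
      have hq1 : (1 : ℤ) ≤ n / p := (Int.le_ediv_iff_mul_le hppos).mpr (by linarith)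
      have hqr : n / p < r := (Int.ediv_lt_iff_lt_mul hppos).mpr (by linarith)
      have key : pvSpecDigits r.toNat ds ((n / p).toNat) = [pvDigitAt ds (n / p)] := by
        rw [pvSpecDigits]
        rw [dif_neg (by omega : ¬ ((n / p).toNat = 0 ∨ r.toNat ≤ 1))]
        rw [show (n / p).toNat / r.toNat = 0 from Nat.div_eq_of_lt (by omega)]
        rw [pvSpecDigits, dif_pos (Or.inl rfl)]
        rw [show ((((n / p).toNat % r.toNat : ℕ)) : ℤ) = n / p by
          rw [Nat.mod_eq_of_lt (by omega)]; omega]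
        simp
      rw [key]

theorem integer_positional_notation_spec : Claim_equal_integer_positional_notation := by
  intro number digits _ hpre
  unfold Spec_integer_positional_notation integer_positional_notation integer_positional_notation_alt
  rcases hpre with hneg | ⟨hz, _⟩ | ⟨hpos, hlen⟩
  · rw [if_neg (by omega), if_neg (by omega),
      pvLoopA_nonpos _ _ _ _ _ (by omega), pvPowsB_gt _ _ _ _ (by omega)]
    rfl
  · rw [if_pos hz, if_pos hz]
  · obtain ⟨m, rfl⟩ := Int.eq_ofNat_of_zero_le (le_of_lt hpos)
    have hm : 0 < m := by exact_mod_cast hpos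
    rw [if_neg (by exact_mod_cast Nat.pos_iff_ne_zero.mp hm), if_neg (by exact_mod_cast Nat.pos_iff_ne_zero.mp hm)]
    rw [show PySem.Str.len digits = (digits.toList.length : Int) from PySem.Str.len_eq digits]
    simp only [Int.toNat_natCast]
    have hb : ((m : ℕ) : ℤ) < 1 * 2 ^ (m + 1) := by
      have h1 := Nat.lt_two_pow_self (n := m)
      calc ((m : ℕ) : ℤ) < ((2 ^ m : ℕ) : ℤ) := by exact_mod_cast h1
        _ ≤ 1 * 2 ^ (m + 1) := by
            push_cast
            have h4 : (0 : ℤ) < 2 ^ m := by positivity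
            rw [pow_succ]; nlinarith
    rw [foldPows (digits.toList.length : Int) digits.toList (by exact_mod_cast hlen)
      ((m : ℕ) : ℤ) hpos (m + 1) 1 [] le_rfl (by omega) hb]
    rw [pvLoopA_spec digits.toList.length digits.toList hlen (m + 1) m [] hm (by omega)]
    simp
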